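-- pv_equiv track=rewrite | github.com/AnishIdhayan-1412/hiringpipeline | module2.py | _highest_education
-- ===== SOURCE A (Python) =====
-- from typing import Any, Dict, List, Optional, Tuple
--
-- def _highest_education(
--     education: List[Dict[str, Any]],
-- ) -> Tuple[str, str]:
--     """Select the highest-level education entry from a parsed education list.
--
--     Uses an explicit priority ordering so "PhD" always ranks above "B.Tech"
--     regardless of list order or alphabetical comparison.
--
--     Args:
--         education: List of education entry dicts produced by module0b.
--                    Each dict may have keys: "level", "field".
--
--     Returns:
--         Tuple (level, field). Both are empty strings if no entries exist
--         or none contain recognisable level/field data.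
--     """
--     _PRIORITY: List[str] = [
--         "PhD", "MBA", "M.Tech", "M.Sc", "M.E", "M.A", "MCA", "Master",
--         "Postgraduate", "B.Tech", "B.E", "B.Sc", "B.A", "BCA", "Bachelor",
--         "Undergraduate", "Diploma", "Certificate", "HSC", "SSLC",
--         "High School", "Secondary", "CBSE", "ICSE",
--     ]
--     if not education:
--         return "", ""
--
--     best_level:    str = ""
--     best_field:    str = ""
--     best_priority: int = len(_PRIORITY) + 1
--
--     for entry in education:
--         level = entry.get("level", "") or ""
--         field = entry.get("field", "") or ""
--         try:
--             priority = _PRIORITY.index(level)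
--         except ValueError:
--             priority = len(_PRIORITY)
--
--         if priority < best_priority:
--             best_priority = priority
--             best_level    = level
--             best_field    = field
--
--     return best_level, best_field
-- ===== SOURCE B (Python) =====
-- from typing import Any, Dict, List, Tuple
--
-- _PRIORITY: List[str] = [
--     "PhD", "MBA", "M.Tech", "M.Sc", "M.E", "M.A", "MCA", "Master",
--     "Postgraduate", "B.Tech", "B.E", "B.Sc", "B.A", "BCA", "Bachelor",
--     "Undergraduate", "Diploma", "Certificate", "HSC", "SSLC",
--     "High School", "Secondary", "CBSE", "ICSE",
-- ]
-- _RANK: Dict[str, int] = {lvl: i for i, lvl in enumerate(_PRIORITY)}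
--
--
-- def _highest_education(
--     education: List[Dict[str, Any]],
-- ) -> Tuple[str, str]:
--     """Stably sort entries by rank-table key and take the first one."""
--     if not education:
--         return "", ""
--     ranked = sorted(
--         education,
--         key=lambda e: _RANK.get(e.get("level", "") or "", len(_PRIORITY)),
--     )
--     best = ranked[0]
--     return best.get("level", "") or "", best.get("field", "") or ""
-- ===== Notes on version B (the rewrite author's own statement) =====
-- stated objective: alternative
-- what changed: Replaces the running-minimum scan with repeated list.index calls by a rank dict built once from the priority table plus a stable sort by that O(1)-lookup key, returning the first element of the sorted view.
import Mathlib
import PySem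

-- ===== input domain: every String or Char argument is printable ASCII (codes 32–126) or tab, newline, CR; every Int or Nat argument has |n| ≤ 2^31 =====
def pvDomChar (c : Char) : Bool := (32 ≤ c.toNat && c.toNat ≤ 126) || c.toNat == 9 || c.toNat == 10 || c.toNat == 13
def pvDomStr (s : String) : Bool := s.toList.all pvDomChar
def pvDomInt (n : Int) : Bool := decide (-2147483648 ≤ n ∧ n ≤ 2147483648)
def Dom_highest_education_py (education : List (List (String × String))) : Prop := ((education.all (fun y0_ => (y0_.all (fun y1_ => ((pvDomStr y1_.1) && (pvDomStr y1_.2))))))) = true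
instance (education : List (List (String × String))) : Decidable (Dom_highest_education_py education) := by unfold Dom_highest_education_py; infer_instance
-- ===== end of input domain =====

-- B replaces A's running-minimum scan (a linear _PRIORITY.index per entry) by a rank
-- dict built once plus a stable sort by that key, taking the first element;
-- objective: alternative decomposition (not claimed faster).

-- ===== PORT A =====
-- the _PRIORITY table of A (B's module-level copy is the same list)
def pvPriority : List String :=
  ["PhD", "MBA", "M.Tech", "M.Sc", "M.E", "M.A", "MCA", "Master",
   "Postgraduate", "B.Tech", "B.E", "B.Sc", "B.A", "BCA", "Bachelor",
   "Undergraduate", "Diploma", "Certificate", "HSC", "SSLC",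
   "High School", "Secondary", "CBSE", "ICSE"]

-- `s or ""` for a string s (identity on strings; kept to mirror the Python line)
def pvOrEmpty (s : String) : String := if s == "" then "" else s

-- the body of A's for-loop: one update of (best_level, best_field, best_priority)
def pvStepA (acc : String × String × Int) (entry : List (String × String)) :
    String × String × Int :=
  let level := pvOrEmpty ((PySem.Dict.mk entry).getD "level" "")
  let field := pvOrEmpty ((PySem.Dict.mk entry).getD "field" "")
  let priority : Int :=
    match PySem.List.index? pvPriority level with
    | some k => (k : Int)                 -- _PRIORITY.index(level)
    | none => (pvPriority.length : Int)   -- except ValueError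
  if priority < acc.2.2 then (level, field, priority) else acc

def highest_education_py (education : List (List (String × String))) : String × String :=
  if education = [] then ("", "")
  else
    let st := education.foldl pvStepA ("", "", (pvPriority.length : Int) + 1)
    (st.1, st.2.1)

-- ===== PORT B =====
-- _RANK = {lvl: i for i, lvl in enumerate(_PRIORITY)}
def pvRank : PySem.Dict String Int :=
  (PySem.List.enumerate pvPriority).foldl (fun d p => d.insert p.2 p.1) PySem.Dict.empty

-- key=lambda e: _RANK.get(e.get("level","") or "", len(_PRIORITY))
def pvKeyB (entry : List (String × String)) : Int :=
  pvRank.getD (pvOrEmpty ((PySem.Dict.mk entry).getD "level" "")) (pvPriority.length : Int)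

def highest_education_py_alt (education : List (List (String × String))) : String × String :=
  if education = [] then ("", "")
  else
    let ranked := PySem.List.sorted education pvKeyB
    let best := ranked.headD []          -- ranked[0]; ranked is nonempty here
    (pvOrEmpty ((PySem.Dict.mk best).getD "level" ""),
     pvOrEmpty ((PySem.Dict.mk best).getD "field" ""))

-- ===== PRECONDITION & SPEC =====
def Spec_highest_education_py (education : List (List (String × String))) (out : String × String) : Prop := out = highest_education_py_alt education
instance (education : List (List (String × String))) (out : String × String) : Decidable (Spec_highest_education_py education out) := by unfold Spec_highest_education_py; infer_instance

-- ===== CLAIM (what is proved, stated in full; the proofs are below) =====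
def Claim_equal_highest_education_py : Prop := ∀ (education : List (List (String × String))), Dom_highest_education_py education → Spec_highest_education_py education (highest_education_py education)

-- ===== LEMMAS AND PROOFS =====

def pvLevel (entry : List (String × String)) : String :=
  pvOrEmpty ((PySem.Dict.mk entry).getD "level" "")

def pvField (entry : List (String × String)) : String :=
  pvOrEmpty ((PySem.Dict.mk entry).getD "field" "")

-- running minimum keeping the earlier element on ties
def pvFm (b : List (String × String)) (xs : List (List (String × String))) :
    List (String × String) :=
  xs.foldl (fun b x => if pvKeyB x < pvKeyB b then x else b) b

-- rank-dict lookup = list index (generic accumulator form)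
theorem pvRank_fold_getD (P : List String) (s : String) (i dflt : Int)
    (d : PySem.Dict String Int) (hP : P.Nodup)
    (hd : ∀ t, t ∈ P → d.contains t = false) :
    ((PySem.List.enumerate P i).foldl (fun d p => d.insert p.2 p.1) d).getD s dflt
      = match PySem.List.index? P s with
        | some k => i + (k : Int)
        | none => d.getD s dflt := by
  induction P generalizing i d with
  | nil => simp [PySem.List.enumerate, PySem.List.index?]
  | cons x xs ih =>
    rw [PySem.List.enumerate_cons, List.foldl_cons]
    have hxs : xs.Nodup := hP.of_cons
    have hx : x ∉ xs := (List.nodup_cons.mp hP).1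
    have hd' : ∀ t, t ∈ xs → (d.insert x i).contains t = false := by
      intro t ht
      have : t ≠ x := fun h => hx (h ▸ ht)
      simp [PySem.Dict.contains_insert, this, hd t (List.mem_cons_of_mem _ ht)]
    rw [ih _ _ hxs hd']
    by_cases hsx : x = s
    · subst hsx
      have hnone : PySem.List.index? xs x = none :=
        (PySem.List.index?_eq_none_iff xs x).mpr hx
      rw [PySem.List.index?_cons_self, hnone]
      simp [PySem.Dict.getD_insert_self]
    · rw [PySem.List.index?_cons_of_ne xs hsx]
      cases h : PySem.List.index? xs s with
      | some k => simp; ring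
      | none =>
        simp
        rw [PySem.Dict.getD_insert_of_ne]
        exact fun h' => hsx h'.symm

-- B's sort key equals A's computed priority
theorem pvKeyB_eq_prio (entry : List (String × String)) :
    pvKeyB entry
      = match PySem.List.index? pvPriority (pvLevel entry) with
        | some k => ((k : Int))
        | none => ((pvPriority.length : Int)) := by
  unfold pvKeyB pvLevel pvRank
  rw [pvRank_fold_getD _ _ _ _ _ (by decide) (by intro t _; simp [PySem.Dict.contains_empty])]
  cases h : PySem.List.index? pvPriority (pvOrEmpty ((PySem.Dict.mk entry).getD "level" "")) with
  | some k => simp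
  | none => simp [PySem.Dict.getD_empty]

-- every key is < len(_PRIORITY) + 1
theorem pvKeyB_lt (entry : List (String × String)) :
    pvKeyB entry < (pvPriority.length : Int) + 1 := by
  rw [pvKeyB_eq_prio]
  cases h : PySem.List.index? pvPriority (pvLevel entry) with
  | some k =>
    obtain ⟨hk, -, -⟩ := PySem.List.getElem_of_index?_eq_some h
    show ((k : Int)) < (pvPriority.length : Int) + 1
    omega
  | none =>
    show ((pvPriority.length : Int)) < (pvPriority.length : Int) + 1
    omega

-- A's step = compare-by-key step
theorem pvStepA_eq (acc : String × String × Int) (entry : List (String × String)) :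
    pvStepA acc entry
      = if pvKeyB entry < acc.2.2 then (pvLevel entry, pvField entry, pvKeyB entry)
        else acc := by
  unfold pvStepA
  rw [pvKeyB_eq_prio]
  rfl

-- A's fold from the state of b computes the state of the running minimum
theorem pvFoldA_eq_fm (xs : List (List (String × String))) (b : List (String × String)) :
    xs.foldl pvStepA (pvLevel b, pvField b, pvKeyB b)
      = (pvLevel (pvFm b xs), pvField (pvFm b xs), pvKeyB (pvFm b xs)) := by
  induction xs generalizing b with
  | nil => simp [pvFm]
  | cons x xs ih =>
    rw [List.foldl_cons, pvStepA_eq]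
    by_cases h : pvKeyB x < pvKeyB b
    · simp only [if_pos h, pvFm, List.foldl_cons]
      exact ih x
    · simp only [pvFm, List.foldl_cons, if_neg h]
      exact ih b

-- head of the stable sort is the running minimum
theorem pvSorted_head (xs : List (List (String × String))) :
    (PySem.List.sorted xs pvKeyB).head? =
      (match xs with | [] => none | x :: t => some (pvFm x t)) := by
  induction xs using List.reverseRecOn with
  | nil => rfl
  | append_singleton xs x ih =>
    have hs : PySem.List.sorted (xs ++ [x]) pvKeyB =
        PySem.List.insertBy (fun a b => decide (pvKeyB a < pvKeyB b)) x
          (PySem.List.sorted xs pvKeyB) := by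
      rw [PySem.List.sorted_eq_foldl_insertBy, PySem.List.sorted_eq_foldl_insertBy,
        List.foldl_append, List.foldl_cons, List.foldl_nil]
    rw [hs]
    cases xs with
    | nil =>
      have h0 : PySem.List.sorted ([] : List (List (String × String))) pvKeyB = [] := rfl
      rw [h0]
      simp [PySem.List.insertBy, pvFm]
    | cons y t =>
      cases hsrt : PySem.List.sorted (y :: t) pvKeyB with
      | nil =>
        exact absurd ((PySem.List.sorted_eq_nil_iff _ _ _).mp hsrt) (by simp)
      | cons m r =>
        rw [hsrt] at ih
        have hm : m = pvFm y t := by simpa using ih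
        have hfm : pvFm y (t ++ [x]) = if pvKeyB x < pvKeyB m then x else pvFm y t := by
          rw [hm]; simp [pvFm, List.foldl_append]
        show (PySem.List.insertBy (fun a b => decide (pvKeyB a < pvKeyB b)) x (m :: r)).head?
            = some (pvFm y (t ++ [x]))
        simp only [PySem.List.insertBy]
        by_cases h : pvKeyB x < pvKeyB m
        · simp [h, hfm]
        · simp [h, hfm, ← hm]

-- ===== VERDICT (by name: the statement is the Claim_ definition above) =====
theorem highest_education_py_spec : Claim_equal_highest_education_py := by
  intro education _
  unfold Spec_highest_education_py highest_education_py highest_education_py_alt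
  cases education with
  | nil => rfl
  | cons e rest =>
    simp only [if_neg (List.cons_ne_nil e rest)]
    have hfirst : pvStepA ("", "", (pvPriority.length : Int) + 1) e
        = (pvLevel e, pvField e, pvKeyB e) := by
      rw [pvStepA_eq]
      exact if_pos (pvKeyB_lt e)
    rw [List.foldl_cons, hfirst, pvFoldA_eq_fm]
    have hhead := pvSorted_head (e :: rest)
    cases hsrt : PySem.List.sorted (e :: rest) pvKeyB with
    | nil =>
      exact absurd ((PySem.List.sorted_eq_nil_iff _ _ _).mp hsrt) (by simp)
    | cons m r =>
      rw [hsrt] at hhead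
      simp only [List.head?, Option.some.injEq] at hhead
      simp [List.headD, hhead, pvLevel, pvField]
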